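-- pv_equiv track=rewrite | github.com/manishYadav2007/PythonCodingPrcaticeProblems | HackerEarth/favouriteSinger.py | find_favourite_singer
-- ===== SOURCE A (Python) =====
-- def find_favourite_singer(n, playlists):
--         counts = {}
--         max_f = 0
--
--         for i in playlists:
--                 counts[i] = counts.get(i, 0) + 1
--                 max_f = max(max_f, counts[i])
--         n = 0
--         for j in counts.values():
--                 if j == max_f:
--                         n += 1
--         return n
-- ===== SOURCE B (Python) =====
-- def find_favourite_singer(n, playlists):
--     counts = {}
--     freq = {}
--     max_f = 0
--     for i in playlists:
--         c = counts.get(i, 0)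
--         counts[i] = c + 1
--         if c != 0:
--             freq[c] = freq.get(c, 0) - 1
--         freq[c + 1] = freq.get(c + 1, 0) + 1
--         if c + 1 > max_f:
--             max_f = c + 1
--     return freq.get(max_f, 0)
-- ===== Notes on version B (the rewrite author's own statement) =====
-- stated objective: alternative
-- what changed: Single pass that maintains a frequency-of-frequencies dict alongside the counts, so the final answer is one lookup instead of A's second scan over all distinct values.
import Mathlib
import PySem

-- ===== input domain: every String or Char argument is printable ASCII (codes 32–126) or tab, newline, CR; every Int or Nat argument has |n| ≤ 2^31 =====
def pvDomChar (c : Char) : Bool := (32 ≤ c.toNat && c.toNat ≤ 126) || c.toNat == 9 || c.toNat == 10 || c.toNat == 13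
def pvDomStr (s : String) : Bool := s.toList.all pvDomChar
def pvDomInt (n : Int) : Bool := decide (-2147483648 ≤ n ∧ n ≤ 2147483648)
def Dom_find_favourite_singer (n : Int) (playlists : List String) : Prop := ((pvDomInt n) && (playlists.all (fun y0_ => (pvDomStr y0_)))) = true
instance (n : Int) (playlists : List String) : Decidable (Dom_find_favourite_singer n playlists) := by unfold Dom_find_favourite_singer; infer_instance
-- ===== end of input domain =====

-- B fuses A's "build counts, then rescan values for the maximum's multiplicity" into ONE pass
-- that also maintains a frequency-of-frequencies dict; the answer is a single lookup at the end.

-- ===== PORT A =====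
-- A's first loop: counts[i] = counts.get(i, 0) + 1; max_f = max(max_f, counts[i])
def pvStepA (p : PySem.Dict String Int × Int) (i : String) : PySem.Dict String Int × Int :=
  let counts := p.1.insert i (p.1.getD i 0 + 1)
  (counts, max p.2 (counts.getD i 0))   -- counts[i] is present right after the insert, so getD is exact

def find_favourite_singer (n : Int) (playlists : List String) : Int :=
  let st := playlists.foldl pvStepA (PySem.Dict.empty, 0)
  -- second loop: n = 0; for j in counts.values(): if j == max_f: n += 1
  st.1.values.foldl (fun m j => if j = st.2 then m + 1 else m) 0

-- ===== PORT B =====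
-- state: (counts, freq, max_f)
def pvStepB (p : PySem.Dict String Int × PySem.Dict Int Int × Int) (i : String) :
    PySem.Dict String Int × PySem.Dict Int Int × Int :=
  let c := p.1.getD i 0
  let counts := p.1.insert i (c + 1)
  let freq0 := if c ≠ 0 then p.2.1.insert c (p.2.1.getD c 0 - 1) else p.2.1
  let freq := freq0.insert (c + 1) (freq0.getD (c + 1) 0 + 1)
  let maxf := if c + 1 > p.2.2 then c + 1 else p.2.2
  (counts, freq, maxf)

def find_favourite_singer_alt (n : Int) (playlists : List String) : Int :=
  let st := playlists.foldl pvStepB (PySem.Dict.empty, PySem.Dict.empty, 0)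
  st.2.1.getD st.2.2 0

-- ===== PRECONDITION & SPEC =====
def Spec_find_favourite_singer (n : Int) (playlists : List String) (out : Int) : Prop := out = find_favourite_singer_alt n playlists
instance (n : Int) (playlists : List String) (out : Int) : Decidable (Spec_find_favourite_singer n playlists out) := by unfold Spec_find_favourite_singer; infer_instance

-- ===== CLAIM (what is proved, stated in full; the proofs are below) =====
def Claim_equal_find_favourite_singer : Prop := ∀ (n : Int) (playlists : List String), Dom_find_favourite_singer n playlists → Spec_find_favourite_singer n playlists (find_favourite_singer n playlists)

-- ===== LEMMAS AND PROOFS =====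

-- coupling invariant between A's state (d, m) and B's extra freq dict
def pvInv (d : PySem.Dict String Int) (freq : PySem.Dict Int Int) (m : Int) : Prop :=
  d.keys.Nodup ∧ (∀ v ∈ d.values, 1 ≤ v) ∧
  (∀ k : Int, 1 ≤ k → freq.getD k 0 = (d.values.count k : Int)) ∧
  freq.getD 0 0 = 0 ∧ 0 ≤ m

-- A's second loop is a count
lemma pvFoldCount (l : List Int) (m s : Int) :
    l.foldl (fun acc j => if j = m then acc + 1 else acc) s = s + (l.count m : Int) := by
  induction l generalizing s with
  | nil => simp
  | cons x xs ih =>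
    simp only [List.foldl_cons, List.count_cons, ih]
    by_cases h : x = m <;> simp [h] <;> ring

-- replacing the snd of the unique pair with fst = i swaps one c for one w in the value counts
lemma pvCountUpdate (l : List (String × Int)) (i : String) (c w k : Int)
    (hnd : (l.map Prod.fst).Nodup) (hmem : (i, c) ∈ l) :
    ((l.map (fun p => if p.1 == i then (i, w) else p)).map Prod.snd).count k
      + (if k = c then 1 else 0)
    = (l.map Prod.snd).count k + (if k = w then 1 else 0) := by
  induction l with
  | nil => simp at hmem
  | cons p rest ih =>
    simp only [List.map_cons, List.nodup_cons, List.mem_map] at hnd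
    rcases List.mem_cons.mp hmem with h | h
    · have hrest : rest.map (fun p => if p.1 == i then (i, w) else p) = rest := by
        have hcong : ∀ q ∈ rest, (if q.1 == i then (i, w) else q) = id q := by
          intro q hq
          have hqi : ¬ q.1 = i := fun he => hnd.1 ⟨q, hq, by rw [← h]; exact he⟩
          simp [hqi]
        rw [List.map_congr_left hcong, List.map_id]
      rw [← h]
      simp only [List.map_cons, hrest]
      rw [show (if (((i, c) : String × Int).1 == i) = true then (i, w) else (i, c)) = (i, w) from by simp]
      simp only [List.count_cons, beq_iff_eq]
      split_ifs <;> omega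
    · have hpi : ¬ p.1 = i := fun he => hnd.1 ⟨(i, c), h, by simp [he]⟩
      have ihh := ih hnd.2 h
      have hhead : (p :: rest).map (fun q => if q.1 == i then (i, w) else q)
          = p :: rest.map (fun q => if q.1 == i then (i, w) else q) := by
        simp [hpi]
      rw [hhead]
      simp only [List.map_cons, List.count_cons, beq_iff_eq] at ihh ⊢
      split_ifs at ihh ⊢ <;> omega

lemma pvStepPreserves (d : PySem.Dict String Int) (freq : PySem.Dict Int Int) (m : Int)
    (i : String) (h : pvInv d freq m) :
    pvStepB (d, freq, m) i = ((pvStepA (d, m) i).1, (pvStepB (d, freq, m) i).2.1, (pvStepA (d, m) i).2)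
    ∧ pvInv (pvStepA (d, m) i).1 (pvStepB (d, freq, m) i).2.1 (pvStepA (d, m) i).2 := by
  obtain ⟨hnd, hpos, hfreq, hz, hm⟩ := h
  set c := d.getD i 0 with hc
  have hmaxeq : (pvStepB (d, freq, m) i).2.2 = (pvStepA (d, m) i).2 := by
    simp only [pvStepA, pvStepB, PySem.Dict.getD_insert_self, ← hc]
    omega
  have hcnteq : (pvStepB (d, freq, m) i).1 = (pvStepA (d, m) i).1 := by
    simp [pvStepA, pvStepB, ← hc]
  refine ⟨by rw [← hmaxeq, ← hcnteq], ?_⟩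
  by_cases hin : d.contains i = true
  · -- existing key: c is its current value, ≥ 1
    obtain ⟨v, hv⟩ : ∃ v, d.get? i = some v := by
      cases hg : d.get? i with
      | none => rw [PySem.Dict.get?_eq_none_iff_contains] at hg; simp [hg] at hin
      | some v => exact ⟨v, rfl⟩
    have hcv : c = v := by rw [hc, PySem.Dict.getD_eq_get?_getD, hv]; rfl
    have hitems : (i, c) ∈ d.items := by
      rw [hcv]; exact PySem.Dict.mem_items_of_get?_eq_some d hv
    have hcval : c ∈ d.values := by
      simp only [PySem.Dict.values, List.mem_map]
      exact ⟨(i, c), hitems, rfl⟩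
    have hc1 : 1 ≤ c := hpos c hcval
    have hitems' : ((pvStepA (d, m) i).1).items
        = d.items.map (fun p => if p.1 == i then (i, c + 1) else p) := by
      show (d.insert i (d.getD i 0 + 1)).items = _
      rw [PySem.Dict.items_insert_of_contains d _ hin, ← hc]
    have hkeys' : ((pvStepA (d, m) i).1).keys = d.keys := by
      show (d.insert i (d.getD i 0 + 1)).keys = d.keys
      exact PySem.Dict.keys_insert_of_contains d _ hin
    have hnd' : (d.items.map Prod.fst).Nodup := by
      simpa [PySem.Dict.keys] using hnd
    have hcnt : ∀ k : Int, (((pvStepA (d, m) i).1).values.count k : Int) + (if k = c then 1 else 0)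
        = (d.values.count k : Int) + (if k = c + 1 then 1 else 0) := by
      intro k
      have hcu := pvCountUpdate d.items i c (c + 1) k hnd' hitems
      simp only [PySem.Dict.values, hitems']
      split_ifs at hcu ⊢ <;> exact_mod_cast hcu
    have hfr : (pvStepB (d, freq, m) i).2.1
        = (freq.insert c (freq.getD c 0 - 1)).insert (c + 1)
            ((freq.insert c (freq.getD c 0 - 1)).getD (c + 1) 0 + 1) := by
      simp only [pvStepB, ← hc]
      have : ¬ c = 0 := by omega
      simp [this]
    refine ⟨hkeys' ▸ hnd, ?_, ?_, ?_, ?_⟩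
    · intro w hw
      simp only [PySem.Dict.values, hitems', List.map_map, List.mem_map] at hw
      obtain ⟨p, hp, hpw⟩ := hw
      by_cases hpi : p.1 = i
      · have hwv : w = c + 1 := by simpa [Function.comp, hpi] using hpw.symm
        omega
      · have hwv : w = p.2 := by simpa [Function.comp, hpi] using hpw.symm
        rw [hwv]
        exact hpos p.2 (by simp only [PySem.Dict.values, List.mem_map]; exact ⟨p, hp, rfl⟩)
    · intro k hk
      rw [hfr]
      simp only [PySem.Dict.getD_insert]
      have hA := hcnt k
      by_cases h1 : k = c + 1
      · subst h1
        rw [if_pos rfl]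
        rw [if_neg (by omega : ¬ (c + 1 : Int) = c)]
        rw [if_neg (by omega : ¬ (c + 1 : Int) = c), if_pos rfl] at hA
        rw [hfreq (c + 1) (by omega)]
        omega
      · rw [if_neg h1]
        rw [if_neg h1] at hA
        by_cases h2 : k = c
        · subst h2
          rw [if_pos rfl] at hA ⊢
          rw [hfreq c hc1]
          have hC : 1 ≤ d.values.count c := List.count_pos_iff.mpr hcval
          omega
        · rw [if_neg h2] at hA ⊢
          rw [hfreq k hk]
          omega
    · rw [hfr]
      rw [PySem.Dict.getD_insert_of_ne _ _ _ (by omega : (0 : Int) ≠ c + 1),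
          PySem.Dict.getD_insert_of_ne _ _ _ (by omega : (0 : Int) ≠ c)]
      exact hz
    · simp only [pvStepA]; omega
  · -- fresh key: c = 0
    have hc0 : c = 0 := by
      rw [hc]
      exact PySem.Dict.getD_of_not_contains d 0 (by simpa using hin)
    have hitems' : ((pvStepA (d, m) i).1).items = d.items ++ [(i, (1 : Int))] := by
      show (d.insert i (d.getD i 0 + 1)).items = _
      rw [PySem.Dict.items_insert_of_not_contains d _ (by simpa using hin), ← hc, hc0]
      norm_num
    have hvals' : ((pvStepA (d, m) i).1).values = d.values ++ [(1 : Int)] := by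
      simp [PySem.Dict.values, hitems']
    have hkeys' : ((pvStepA (d, m) i).1).keys = d.keys ++ [i] := by
      simp [PySem.Dict.keys, hitems']
    have hfr : (pvStepB (d, freq, m) i).2.1 = freq.insert 1 (freq.getD 1 0 + 1) := by
      simp [pvStepB, ← hc, hc0]
    refine ⟨?_, ?_, ?_, ?_, ?_⟩
    · rw [hkeys']
      refine List.Nodup.append hnd (List.nodup_singleton i) ?_
      intro a ha hb
      simp only [List.mem_singleton] at hb
      subst hb
      exact hin (PySem.Dict.contains_iff_mem_keys d a |>.mpr ha)
    · intro w hw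
      rw [hvals'] at hw
      rcases List.mem_append.mp hw with hmem | hmem
      · exact hpos w hmem
      · simp only [List.mem_singleton] at hmem; omega
    · intro k hk
      rw [hfr, hvals', PySem.Dict.getD_insert, List.count_append]
      by_cases h1 : k = 1
      · subst h1
        rw [if_pos rfl, hfreq 1 (by omega)]
        simp
      · rw [if_neg h1, hfreq k hk]
        have hb : List.count k [(1 : Int)] = 0 := by
          rw [List.count_eq_zero]; simpa using h1
        rw [hb]
        simp
    · rw [hfr, PySem.Dict.getD_insert_of_ne _ _ _ (by omega : (0 : Int) ≠ 1)]
      exact hz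
    · simp only [pvStepA]; omega

lemma pvCoupled (l : List String) :
    ∀ (d : PySem.Dict String Int) (freq : PySem.Dict Int Int) (m : Int), pvInv d freq m →
      (l.foldl pvStepB (d, freq, m)).1 = (l.foldl pvStepA (d, m)).1
      ∧ (l.foldl pvStepB (d, freq, m)).2.2 = (l.foldl pvStepA (d, m)).2
      ∧ pvInv (l.foldl pvStepA (d, m)).1 (l.foldl pvStepB (d, freq, m)).2.1
          (l.foldl pvStepA (d, m)).2 := by
  induction l with
  | nil => intro d freq m h; exact ⟨rfl, rfl, h⟩
  | cons x xs ih =>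
    intro d freq m h
    obtain ⟨hstep, hinv⟩ := pvStepPreserves d freq m x h
    simp only [List.foldl_cons]
    have hgoal := ih (pvStepA (d, m) x).1 (pvStepB (d, freq, m) x).2.1 (pvStepA (d, m) x).2 hinv
    rw [hstep]
    exact hgoal

lemma pvInvInit : pvInv PySem.Dict.empty PySem.Dict.empty 0 := by
  refine ⟨?_, ?_, ?_, rfl, le_refl 0⟩
  · simp [PySem.Dict.keys, PySem.Dict.empty]
  · simp [PySem.Dict.values, PySem.Dict.empty]
  · intro k _; rfl

-- ===== VERDICT (by name: the statement is the Claim_ definition above) =====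
theorem find_favourite_singer_spec : Claim_equal_find_favourite_singer := by
  intro n playlists _
  unfold Spec_find_favourite_singer find_favourite_singer find_favourite_singer_alt
  obtain ⟨hd, hmax, hnd, hpos, hfreq, hz, hm⟩ :=
    pvCoupled playlists PySem.Dict.empty PySem.Dict.empty 0 pvInvInit
  set stA := playlists.foldl pvStepA (PySem.Dict.empty, 0) with hA
  set stB := playlists.foldl pvStepB (PySem.Dict.empty, PySem.Dict.empty, 0) with hB
  rw [pvFoldCount]
  show 0 + (List.count stA.2 stA.1.values : Int) = stB.2.1.getD stB.2.2 0
  rw [hmax]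
  by_cases h1 : 1 ≤ stA.2
  · rw [hfreq stA.2 h1]; ring
  · have h0 : stA.2 = 0 := by omega
    rw [h0]
    have hcz : stA.1.values.count 0 = 0 := by
      rw [List.count_eq_zero]
      intro hmem
      exact absurd (hpos 0 hmem) (by omega)
    rw [hz, hcz]
    simp
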